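-- pv_equiv track=rewrite | github.com/jxchok/MCC-2024 | magicalorbs.py | max_magical_power
-- ===== SOURCE A (Python) =====
-- MOD = 10**9 + 7
--
-- def max_magical_power(orbs):
--     while len(orbs) > 1:
--         orbs.sort()
--
--         x = orbs[-2]
--         y = orbs[-1]
--
--         new_orb = (x + 2 * y)
--
--         orbs.pop()
--         orbs.pop()
--
--         orbs.append(new_orb)
--     return orbs[0]% MOD
-- ===== SOURCE B (Python) =====
-- MOD = 10 ** 9 + 7
--
-- def max_magical_power(orbs):
--     # Sort once, descending.  While the current maximum is nonnegative the
--     # combined orb x + 2*y is again the maximum, so that phase is a plain fold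
--     # down the sorted list.  Once everything left is negative, combined orbs
--     # come out in nonincreasing order, so two queues (the sorted tail and the
--     # list of combined orbs, each consumed from the front) always hold the two
--     # largest at their fronts -- no re-sorting or searching ever needed.
--     s = sorted(orbs, reverse=True)
--     acc = s[0]
--     i = 1
--     while i < len(s) and acc >= 0:
--         acc = s[i] + 2 * acc
--         i += 1
--     if i == len(s):
--         return acc % MOD
--     merged = [acc]
--     j = 0
--     while (len(s) - i) + (len(merged) - j) >= 2:
--         if i < len(s) and (j >= len(merged) or s[i] >= merged[j]):
--             y = s[i]; i += 1
--         else: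
--             y = merged[j]; j += 1
--         if i < len(s) and (j >= len(merged) or s[i] >= merged[j]):
--             x = s[i]; i += 1
--         else:
--             x = merged[j]; j += 1
--         merged.append(x + 2 * y)
--     return (s[i] if i < len(s) else merged[j]) % MOD
-- ===== Notes on version B (the rewrite author's own statement) =====
-- stated objective: faster
-- what changed: B replaces the repeated-global-re-sort greedy with a single descending sort followed by two linear phases: while the running maximum is nonnegative the combined orb provably stays the maximum, so that phase is a plain fold over the sorted list; once all remaining orbs are negative the combined orbs come out in nonincreasing order, so a Huffman-style two-queue scan (sorted tail + combined-orb queue, both consumed from the front) yields the two largest in O(1) per step with no searching or insertion.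
-- outside the precondition, e.g. on max_magical_power([]): A raises IndexError, B raises IndexError
import Mathlib
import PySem

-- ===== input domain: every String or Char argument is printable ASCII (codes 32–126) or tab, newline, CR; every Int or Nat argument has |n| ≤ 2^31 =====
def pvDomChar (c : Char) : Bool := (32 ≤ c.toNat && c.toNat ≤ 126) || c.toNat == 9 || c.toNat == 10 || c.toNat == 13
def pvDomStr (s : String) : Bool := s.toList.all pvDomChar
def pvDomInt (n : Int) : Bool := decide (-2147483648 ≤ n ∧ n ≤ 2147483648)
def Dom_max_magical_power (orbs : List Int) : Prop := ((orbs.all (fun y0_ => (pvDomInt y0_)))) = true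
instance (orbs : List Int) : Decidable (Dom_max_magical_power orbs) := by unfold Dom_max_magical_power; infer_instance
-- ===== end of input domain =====

-- B sorts once (descending) and then runs two linear phases — a fold while the running maximum is
-- nonnegative, then a Huffman-style two-queue scan over the all-negative remainder — instead of A's
-- full re-sort per combine step; A sorts/pops its argument in place (the equivalence proved here is
-- about the return value only; B does not mutate its argument).

-- ===== PORT A =====
def MOD : Int := 10 ^ 9 + 7

-- helper cited by the termination proofs: popping the last element of a nonempty list
lemma pop_getD_length (s : List Int) (h : s ≠ []) :
    (((PySem.List.pop? s).getD (0, [])).2).length + 1 = s.length := by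
  rcases List.eq_nil_or_concat s with rfl | ⟨t, v, rfl⟩
  · exact absurd rfl h
  · simp only [List.concat_eq_append]
    rw [PySem.List.pop?_last]; simp

-- one iteration of A's while body: sort ascending, x = orbs[-2], y = orbs[-1], pop, pop, append
def aStep (orbs : List Int) : List Int :=
  let s := PySem.List.sorted orbs (fun v => v) false
  let x := PySem.List.pyGetD s (-2) 0
  let y := PySem.List.pyGetD s (-1) 0
  let new_orb := x + 2 * y
  let s1 := ((PySem.List.pop? s).getD (0, [])).2
  let s2 := ((PySem.List.pop? s1).getD (0, [])).2
  s2 ++ [new_orb]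

lemma length_aStep (orbs : List Int) (h : 1 < orbs.length) :
    (aStep orbs).length + 1 = orbs.length := by
  have hs : (PySem.List.sorted orbs (fun v => v) false).length = orbs.length :=
    PySem.List.length_sorted orbs _ false
  have h1 := pop_getD_length (PySem.List.sorted orbs (fun v => v) false)
    (by rw [← List.length_pos_iff]; omega)
  have h2 := pop_getD_length
    (((PySem.List.pop? (PySem.List.sorted orbs (fun v => v) false)).getD (0, [])).2)
    (by rw [← List.length_pos_iff]; omega)
  simp only [aStep, List.length_append, List.length_cons, List.length_nil]
  omega

lemma aLoop_dec (orbs : List Int) (h : 1 < orbs.length) : (aStep orbs).length < orbs.length := by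
  have := length_aStep orbs h; omega

-- A's while loop
def aLoop (orbs : List Int) : List Int :=
  if _h : 1 < orbs.length then aLoop (aStep orbs) else orbs
termination_by orbs.length
decreasing_by
  exact aLoop_dec orbs _h

def max_magical_power (orbs : List Int) : Int :=
  PySem.Int.mod (PySem.List.pyGetD (aLoop orbs) 0 0) MOD

-- ===== PORT B =====
-- helpers cited by bPhase2's termination proofs
lemma bPhase2_dec_ss (ls lm i j : Nat) (h2 : i + 1 < ls) :
    (ls - (i + 2)) + (lm + 1 - j) < (ls - i) + (lm - j) := by
  refine Nat.lt_of_le_of_lt (Nat.add_le_add_left add_tsub_le_tsub_add _) ?_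
  rw [Nat.add_comm (lm - j) 1, ← Nat.add_assoc]
  have he : ls - (i + 2) + 1 = ls - (i + 1) := by
    rw [show i + 2 = (i + 1) + 1 from rfl, ← Nat.sub_sub]
    exact Nat.succ_pred_eq_of_pos (Nat.sub_pos_of_lt h2 : 0 < ls - (i + 1))
  rw [he]
  exact Nat.add_lt_add_right (Nat.sub_succ_lt_self ls i (Nat.lt_of_succ_lt h2)) (lm - j)

lemma bPhase2_dec_sm (ls lm i j : Nat) (h1 : i < ls) :
    (ls - (i + 1)) + (lm + 1 - (j + 1)) < (ls - i) + (lm - j) := by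
  rw [Nat.succ_sub_succ]
  exact Nat.add_lt_add_right (Nat.sub_succ_lt_self ls i h1) (lm - j)

lemma bPhase2_dec_mm (ls lm i j : Nat) (hj : j < lm) :
    (ls - i) + (lm + 1 - (j + 2)) < (ls - i) + (lm - j) := by
  rw [show j + 2 = (j + 1) + 1 from rfl, Nat.succ_sub_succ]
  exact Nat.add_lt_add_left (Nat.sub_succ_lt_self lm j hj) (ls - i)

lemma bPhase2_jlt (ls lm i j : Nat) (hg : 2 ≤ (ls - i) + (lm - j))
    (hc : lm ≤ j → i < ls → False) : j < lm := by
  rcases Nat.lt_or_ge j lm with h | h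
  · exact h
  · by_cases hi : i < ls
    · exact absurd (hc h hi) not_false
    · rw [Nat.sub_eq_zero_of_le h, Nat.sub_eq_zero_of_le (Nat.le_of_not_lt hi)] at hg
      exact absurd hg (by decide)

-- B's second phase: all remaining orbs are negative; two front-consumed queues (the sorted tail
-- s[i:], descending, and the combined-orb queue merged[j:], nonincreasing) hold the two largest at
-- their fronts.  The two sequential front-pops of Source B are the four branches below, in Source B's order.
def bPhase2 (s : List Int) (i : Nat) (merged : List Int) (j : Nat) : Int :=
  if hg : 2 ≤ (s.length - i) + (merged.length - j) then
    if c1 : i < s.length ∧ (merged.length ≤ j ∨ PySem.List.pyGetD merged (j : Int) 0 ≤ PySem.List.pyGetD s (i : Int) 0) then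
      -- y popped from s
      if c2 : i + 1 < s.length ∧ (merged.length ≤ j ∨ PySem.List.pyGetD merged (j : Int) 0 ≤ PySem.List.pyGetD s ((i + 1 : Nat) : Int) 0) then
        bPhase2 s (i + 2) (merged ++ [PySem.List.pyGetD s ((i + 1 : Nat) : Int) 0 + 2 * PySem.List.pyGetD s (i : Int) 0]) j
      else
        bPhase2 s (i + 1) (merged ++ [PySem.List.pyGetD merged (j : Int) 0 + 2 * PySem.List.pyGetD s (i : Int) 0]) (j + 1)
    else
      -- y popped from merged
      if c2 : i < s.length ∧ (merged.length ≤ j + 1 ∨ PySem.List.pyGetD merged ((j + 1 : Nat) : Int) 0 ≤ PySem.List.pyGetD s (i : Int) 0) then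
        bPhase2 s (i + 1) (merged ++ [PySem.List.pyGetD s (i : Int) 0 + 2 * PySem.List.pyGetD merged (j : Int) 0]) (j + 1)
      else
        bPhase2 s i (merged ++ [PySem.List.pyGetD merged ((j + 1 : Nat) : Int) 0 + 2 * PySem.List.pyGetD merged (j : Int) 0]) (j + 2)
  else
    PySem.Int.mod (if i < s.length then PySem.List.pyGetD s (i : Int) 0 else PySem.List.pyGetD merged (j : Int) 0) (10 ^ 9 + 7)
termination_by (s.length - i) + (merged.length - j)
decreasing_by
  · simp only [List.length_append, List.length_cons, List.length_nil]
    exact bPhase2_dec_ss s.length merged.length i j c2.1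
  · simp only [List.length_append, List.length_cons, List.length_nil]
    exact bPhase2_dec_sm s.length merged.length i j c1.1
  · simp only [List.length_append, List.length_cons, List.length_nil]
    exact bPhase2_dec_sm s.length merged.length i j c2.1
  · simp only [List.length_append, List.length_cons, List.length_nil]
    exact bPhase2_dec_mm s.length merged.length i j
      (bPhase2_jlt s.length merged.length i j hg (fun hj hi => c1 ⟨hi, Or.inl hj⟩))
-- B's first phase: while the current maximum acc is nonnegative, fold down the sorted list
def bPhase1 (s : List Int) (acc : Int) (i : Nat) : Int :=
  if _h : i < s.length then
    if 0 ≤ acc then bPhase1 s (PySem.List.pyGetD s (i : Int) 0 + 2 * acc) (i + 1)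
    else bPhase2 s i [acc] 0
  else PySem.Int.mod acc (10 ^ 9 + 7)
termination_by s.length - i
decreasing_by
  exact Nat.sub_succ_lt_self s.length i _h

def max_magical_power_alt (orbs : List Int) : Int :=
  let s := PySem.List.sorted orbs (fun v => v) true
  bPhase1 s (PySem.List.pyGetD s 0 0) 1

-- ===== PRECONDITION & SPEC =====
-- A raises IndexError on the empty list (orbs[0] after the loop), so it is excluded.
def Pre_max_magical_power (orbs : List Int) : Prop := orbs ≠ []
instance (orbs : List Int) : Decidable (Pre_max_magical_power orbs) := by
  unfold Pre_max_magical_power; infer_instance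

def pvWitness_max_magical_power : List Int := [3, 1, 2]

def Spec_max_magical_power (orbs : List Int) (out : Int) : Prop := out = max_magical_power_alt orbs
instance (orbs : List Int) (out : Int) : Decidable (Spec_max_magical_power orbs out) := by unfold Spec_max_magical_power; infer_instance

-- ===== CLAIM (what is proved, stated in full; the proofs are below) =====
def Claim_equal_max_magical_power : Prop := ∀ (orbs : List Int), Dom_max_magical_power orbs → Pre_max_magical_power orbs → Spec_max_magical_power orbs (max_magical_power orbs)

-- ===== LEMMAS AND PROOFS =====

lemma desc_mem_le {a : Int} {t : List Int} (h : (a :: t).Pairwise (fun u v => v ≤ u)) :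
    ∀ z ∈ t, z ≤ a := (List.pairwise_cons.mp h).1

-- A's step, computed on the concrete shape of the sorted list
lemma aStep_eq' (l R : List Int) (x y : Int)
    (hs : PySem.List.sorted l (fun v => v) false = (R ++ [x]) ++ [y]) :
    aStep l = R ++ [x + 2 * y] := by
  simp only [aStep, hs]
  rw [PySem.List.pop?_last]
  simp only [Option.getD_some]
  rw [PySem.List.pop?_last]
  simp only [Option.getD_some]
  rw [PySem.List.pyGetD_neg_one_append_singleton]
  rw [PySem.List.pyGetD_neg_ofNat _ 2 0 (by omega) (by simp)]
  simp

-- the ascending sort of a multiset whose two largest elements are y ≥ x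
lemma sorted_concat2 (l R : List Int) (x y : Int)
    (hR : ∀ z ∈ R, z ≤ x) (hxy : x ≤ y) (hperm : l.Perm (y :: x :: R)) :
    PySem.List.sorted l (fun v => v) false = (PySem.List.sorted R (fun v => v) false ++ [x]) ++ [y] := by
  have hmem : ∀ z ∈ PySem.List.sorted R (fun v => v) false, z ≤ x := by
    intro z hz
    exact hR z ((PySem.List.mem_sorted R (fun v => v) false z).mp hz)
  apply PySem.List.sorted_id_eq_of_perm_of_pairwise
  · have hp : (PySem.List.sorted R (fun v => v) false).Perm R := PySem.List.sorted_perm R _ false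
    refine List.Perm.trans ?_ hperm.symm
    refine (List.perm_append_singleton y _).trans ?_
    refine List.Perm.cons y ?_
    exact (List.perm_append_singleton x _).trans (hp.cons x)
  · rw [List.append_assoc]
    apply List.pairwise_append.mpr
    refine ⟨PySem.List.sorted_pairwise R (fun v => v), ?_, ?_⟩
    · simp [List.pairwise_cons, hxy]
    · intro a ha b hb
      have hax : a ≤ x := hmem a ha
      have hb' : b = x ∨ b = y := by simpa using hb
      rcases hb' with rfl | rfl
      · exact hax
      · exact le_trans hax hxy

-- one step of A's loop: remove the two largest y ≥ x, append x + 2*y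
lemma aLoop_step (l R : List Int) (x y : Int)
    (hR : ∀ z ∈ R, z ≤ x) (hxy : x ≤ y) (hperm : l.Perm (y :: x :: R)) :
    aLoop l = aLoop (PySem.List.sorted R (fun v => v) false ++ [x + 2 * y]) := by
  have hlen : l.length = R.length + 2 := by simpa using hperm.length_eq
  rw [aLoop, dif_pos (by omega)]
  rw [aStep_eq' l _ x y (sorted_concat2 l R x y hR hxy hperm)]

lemma desc_all_le_front {m : List Int} {j : Nat} (hjl : j < m.length)
    (hp : (m.drop j).Pairwise (fun u v => v ≤ u)) : ∀ z ∈ m.drop j, z ≤ m[j] := by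
  rw [List.drop_eq_getElem_cons hjl] at hp ⊢
  intro z hz
  rcases List.mem_cons.mp hz with rfl | hz
  · exact le_refl _
  · exact desc_mem_le hp z hz

lemma desc_append_singleton {t : List Int} {v : Int}
    (hp : t.Pairwise (fun u w => w ≤ u)) (hv : ∀ z ∈ t, v ≤ z) :
    (t ++ [v]).Pairwise (fun u w => w ≤ u) := by
  apply List.pairwise_append.mpr
  refine ⟨hp, by simp, ?_⟩
  intro a ha b hb
  rcases (by simpa using hb : b = v) with rfl
  exact hv a ha

lemma phase2_eq : ∀ (n : Nat) (s : List Int) (i : Nat) (merged : List Int) (j : Nat) (l : List Int) (B : Int),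
    (s.drop i).length + (merged.drop j).length = n →
    i ≤ s.length → j ≤ merged.length →
    (s.drop i).Pairwise (fun u v => v ≤ u) →
    (merged.drop j).Pairwise (fun u v => v ≤ u) →
    (∀ z ∈ s.drop i, z ≤ B) → (∀ z ∈ merged.drop j, z ≤ B) →
    (∀ z ∈ s.drop i, z < 0) → (∀ z ∈ merged.drop j, z < 0) →
    (∀ z ∈ merged.drop j, 3 * B ≤ z) →
    1 ≤ n →
    l.Perm (s.drop i ++ merged.drop j) →
    PySem.Int.mod (PySem.List.pyGetD (aLoop l) 0 0) (10 ^ 9 + 7) = bPhase2 s i merged j := by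
  intro n
  induction n using Nat.strong_induction_on with
  | _ n IH =>
    intro s i merged j l B hn hi hj hps hpm hbs hbm hns hnm h3 hn1 hperm
    simp only [List.length_drop] at hn
    rw [bPhase2]
    by_cases hg : 2 ≤ (s.length - i) + (merged.length - j)
    · rw [dif_pos hg]
      by_cases c1 : i < s.length ∧ (merged.length ≤ j ∨ PySem.List.pyGetD merged (j : Int) 0 ≤ PySem.List.pyGetD s (i : Int) 0)
      · rw [dif_pos c1]
        obtain ⟨hi1, hc1⟩ := c1
        have hsti : s.drop i = s[i] :: s.drop (i + 1) := List.drop_eq_getElem_cons hi1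
        have hgi : PySem.List.pyGetD s (i : Int) 0 = s[i] := by
          rw [PySem.List.pyGetD_natCast]; exact List.getD_eq_getElem s 0 hi1
        rw [hsti] at hps hbs hns hperm
        have hy : s[i]'hi1 < 0 := hns _ List.mem_cons_self
        have hyB : s[i]'hi1 ≤ B := hbs _ List.mem_cons_self
        have hmt_le_y : ∀ z ∈ merged.drop j, z ≤ s[i] := by
          rcases hc1 with hc | hc
          · intro z hz
            rw [List.drop_eq_nil_of_le hc] at hz
            exact absurd hz (List.not_mem_nil)
          · intro z hz
            have hjm : j < merged.length := by
              by_contra hcon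
              rw [List.drop_eq_nil_of_le (by omega)] at hz
              exact absurd hz (List.not_mem_nil)
            have := desc_all_le_front hjm hpm z hz
            rw [PySem.List.pyGetD_natCast, List.getD_eq_getElem merged 0 hjm, hgi] at hc
            omega
        by_cases c2 : i + 1 < s.length ∧ (merged.length ≤ j ∨ PySem.List.pyGetD merged (j : Int) 0 ≤ PySem.List.pyGetD s ((i + 1 : Nat) : Int) 0)
        · -- both pops from s
          rw [dif_pos c2]
          obtain ⟨hi2, hc2⟩ := c2
          have hsti2 : s.drop (i + 1) = s[i + 1] :: s.drop (i + 2) := List.drop_eq_getElem_cons hi2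
          have hgi2 : PySem.List.pyGetD s ((i + 1 : Nat) : Int) 0 = s[i + 1] := by
            rw [PySem.List.pyGetD_natCast]; exact List.getD_eq_getElem s 0 hi2
          rw [hsti2] at hps hbs hns hperm
          have hx : s[i + 1]'hi2 < 0 := hns _ (List.mem_cons_of_mem _ List.mem_cons_self)
          have hxB : s[i + 1]'hi2 ≤ B := hbs _ (List.mem_cons_of_mem _ List.mem_cons_self)
          have hxy : s[i + 1]'hi2 ≤ s[i]'hi1 := desc_mem_le hps _ List.mem_cons_self
          have hmt_le_x : ∀ z ∈ merged.drop j, z ≤ s[i + 1]'hi2 := by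
            rcases hc2 with hc | hc
            · intro z hz
              rw [List.drop_eq_nil_of_le hc] at hz
              exact absurd hz (List.not_mem_nil)
            · intro z hz
              have hjm : j < merged.length := by
                by_contra hcon
                rw [List.drop_eq_nil_of_le (by omega)] at hz
                exact absurd hz (List.not_mem_nil)
              have := desc_all_le_front hjm hpm z hz
              rw [PySem.List.pyGetD_natCast, List.getD_eq_getElem merged 0 hjm, hgi2] at hc
              omega
          have hps'' := (List.pairwise_cons.mp hps).2
          have hR : ∀ z ∈ s.drop (i + 2) ++ merged.drop j, z ≤ s[i + 1]'hi2 := by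
            intro z hz
            rcases List.mem_append.mp hz with hz | hz
            · exact desc_mem_le hps'' z hz
            · exact hmt_le_x z hz
          have hperm2 : l.Perm (s[i]'hi1 :: s[i + 1]'hi2 :: (s.drop (i + 2) ++ merged.drop j)) := by
            simpa only [List.cons_append] using hperm
          rw [aLoop_step l _ (s[i + 1]'hi2) (s[i]'hi1) hR hxy hperm2, hgi, hgi2]
          set v := s[i + 1]'hi2 + 2 * s[i]'hi1 with hv
          have hvlt : v < s[i + 1]'hi2 := by rw [hv]; omega
          have hvneg : v < 0 := by rw [hv]; omega
          have hv3 : 3 * s[i + 1]'hi2 ≤ v := by rw [hv]; omega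
          have hvB : v ≤ 3 * B := by rw [hv]; omega
          have hdm : (merged ++ [v]).drop j = merged.drop j ++ [v] := List.drop_append_of_le_length hj
          apply IH (n - 1) (by omega) s (i + 2) (merged ++ [v]) j _ (s[i + 1]'hi2)
          · rw [hdm]; simp only [List.length_drop, List.length_append, List.length_cons, List.length_nil]; omega
          · omega
          · simp only [List.length_append, List.length_cons, List.length_nil]; omega
          · exact (List.pairwise_cons.mp hps'').2
          · rw [hdm]
            refine desc_append_singleton hpm ?_
            intro z hz; have := h3 z hz; omega
          · exact fun z hz => desc_mem_le hps'' z hz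
          · rw [hdm]
            intro z hz
            rcases List.mem_append.mp hz with hz | hz
            · exact hmt_le_x z hz
            · rcases (by simpa using hz : z = v) with rfl; exact le_of_lt hvlt
          · exact fun z hz => lt_of_le_of_lt (desc_mem_le hps'' z hz) hx
          · rw [hdm]
            intro z hz
            rcases List.mem_append.mp hz with hz | hz
            · exact hnm z hz
            · rcases (by simpa using hz : z = v) with rfl; exact hvneg
          · rw [hdm]
            intro z hz
            rcases List.mem_append.mp hz with hz | hz
            · have := h3 z hz; omega
            · rcases (by simpa using hz : z = v) with rfl; exact hv3
          · omega
          · rw [hdm, ← List.append_assoc]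
            exact List.Perm.append_right [v] (PySem.List.sorted_perm _ (fun w => w) false)
        · -- y from s, x from merged
          rw [dif_neg c2]
          have hjm : j < merged.length := by
            by_contra hcon
            exact c2 ⟨by omega, Or.inl (by omega)⟩
          have hgj : PySem.List.pyGetD merged (j : Int) 0 = merged[j] := by
            rw [PySem.List.pyGetD_natCast]; exact List.getD_eq_getElem merged 0 hjm
          have hstj : merged.drop j = merged[j] :: merged.drop (j + 1) := List.drop_eq_getElem_cons hjm
          rw [hstj] at hpm hbm hnm h3 hperm hmt_le_y
          have hmj_lt : merged[j] < 0 := hnm _ List.mem_cons_self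
          have hmjB : merged[j] ≤ B := hbm _ List.mem_cons_self
          have hxy : merged[j] ≤ s[i]'hi1 := hmt_le_y _ List.mem_cons_self
          have hst_le_mj : ∀ z ∈ s.drop (i + 1), z ≤ merged[j] := by
            intro z hz
            have hi2 : i + 1 < s.length := by
              by_contra hcon
              rw [List.drop_eq_nil_of_le (by omega)] at hz
              exact absurd hz (List.not_mem_nil)
            have hcontra : ¬ (merged.length ≤ j ∨ PySem.List.pyGetD merged (j : Int) 0 ≤ PySem.List.pyGetD s ((i + 1 : Nat) : Int) 0) := fun hor => c2 ⟨hi2, hor⟩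
            push Not at hcontra
            obtain ⟨-, hlt⟩ := hcontra
            rw [hgj, PySem.List.pyGetD_natCast, List.getD_eq_getElem s 0 hi2] at hlt
            have hsti2 : s.drop (i + 1) = s[i + 1] :: s.drop (i + 2) := List.drop_eq_getElem_cons hi2
            have hps' := (List.pairwise_cons.mp hps).2
            rw [hsti2] at hz hps'
            rcases List.mem_cons.mp hz with rfl | hz
            · omega
            · have := desc_mem_le hps' z hz
              omega
          have hR : ∀ z ∈ s.drop (i + 1) ++ merged.drop (j + 1), z ≤ merged[j] := by
            intro z hz
            rcases List.mem_append.mp hz with hz | hz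
            · exact hst_le_mj z hz
            · exact desc_mem_le hpm z hz
          have hperm2 : l.Perm (s[i]'hi1 :: merged[j] :: (s.drop (i + 1) ++ merged.drop (j + 1))) := by
            refine hperm.trans ?_
            simp only [List.cons_append]
            exact List.Perm.cons _ List.perm_middle
          rw [aLoop_step l _ merged[j] (s[i]'hi1) hR hxy hperm2, hgi, hgj]
          set v := merged[j] + 2 * s[i]'hi1 with hv
          have hvlt : v < merged[j] := by rw [hv]; omega
          have hvneg : v < 0 := by rw [hv]; omega
          have hv3 : 3 * merged[j] ≤ v := by rw [hv]; omega
          have hvB : v ≤ 3 * B := by rw [hv]; omega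
          have hdm : (merged ++ [v]).drop (j + 1) = merged.drop (j + 1) ++ [v] := List.drop_append_of_le_length (by omega)
          have hpm' := (List.pairwise_cons.mp hpm).2
          apply IH (n - 1) (by omega) s (i + 1) (merged ++ [v]) (j + 1) _ merged[j]
          · rw [hdm]; simp only [List.length_drop, List.length_append, List.length_cons, List.length_nil]; omega
          · omega
          · simp only [List.length_append, List.length_cons, List.length_nil]; omega
          · exact (List.pairwise_cons.mp hps).2
          · rw [hdm]
            refine desc_append_singleton hpm' ?_
            intro z hz; have := h3 z (List.mem_cons_of_mem _ hz); omega
          · exact hst_le_mj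
          · rw [hdm]
            intro z hz
            rcases List.mem_append.mp hz with hz | hz
            · exact desc_mem_le hpm z hz
            · rcases (by simpa using hz : z = v) with rfl; exact le_of_lt hvlt
          · exact fun z hz => hns z (List.mem_cons_of_mem _ hz)
          · rw [hdm]
            intro z hz
            rcases List.mem_append.mp hz with hz | hz
            · exact hnm z (List.mem_cons_of_mem _ hz)
            · rcases (by simpa using hz : z = v) with rfl; exact hvneg
          · rw [hdm]
            intro z hz
            rcases List.mem_append.mp hz with hz | hz
            · have := h3 z (List.mem_cons_of_mem _ hz); omega
            · rcases (by simpa using hz : z = v) with rfl; exact hv3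
          · omega
          · rw [hdm, ← List.append_assoc]
            exact List.Perm.append_right [v] (PySem.List.sorted_perm _ (fun w => w) false)
      · rw [dif_neg c1]
        by_cases c2 : i < s.length ∧ (merged.length ≤ j + 1 ∨ PySem.List.pyGetD merged ((j + 1 : Nat) : Int) 0 ≤ PySem.List.pyGetD s (i : Int) 0)
        · -- y from merged, x from s
          rw [dif_pos c2]
          obtain ⟨hi1, hc2⟩ := c2
          have hjm : j < merged.length := by
            by_contra hcon
            exact c1 ⟨hi1, Or.inl (by omega)⟩
          have hgi : PySem.List.pyGetD s (i : Int) 0 = s[i] := by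
            rw [PySem.List.pyGetD_natCast]; exact List.getD_eq_getElem s 0 hi1
          have hgj : PySem.List.pyGetD merged (j : Int) 0 = merged[j] := by
            rw [PySem.List.pyGetD_natCast]; exact List.getD_eq_getElem merged 0 hjm
          have hsti : s.drop i = s[i] :: s.drop (i + 1) := List.drop_eq_getElem_cons hi1
          have hstj : merged.drop j = merged[j] :: merged.drop (j + 1) := List.drop_eq_getElem_cons hjm
          rw [hsti] at hps hbs hns hperm
          rw [hstj] at hpm hbm hnm h3 hperm
          have hy : s[i]'hi1 < 0 := hns _ List.mem_cons_self
          have hyB : s[i]'hi1 ≤ B := hbs _ List.mem_cons_self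
          have hmj_lt : merged[j] < 0 := hnm _ List.mem_cons_self
          have hmjB : merged[j] ≤ B := hbm _ List.mem_cons_self
          have hlt : s[i]'hi1 < merged[j] := by
            have hcontra : ¬ (merged.length ≤ j ∨ PySem.List.pyGetD merged (j : Int) 0 ≤ PySem.List.pyGetD s (i : Int) 0) := fun hor => c1 ⟨hi1, hor⟩
            push Not at hcontra
            obtain ⟨-, h⟩ := hcontra
            rw [hgi, hgj] at h
            exact h
          have hpm' := (List.pairwise_cons.mp hpm).2
          have hmt1_le_x : ∀ z ∈ merged.drop (j + 1), z ≤ s[i]'hi1 := by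
            rcases hc2 with hc | hc
            · intro z hz
              rw [List.drop_eq_nil_of_le hc] at hz
              exact absurd hz (List.not_mem_nil)
            · intro z hz
              have hjm2 : j + 1 < merged.length := by
                by_contra hcon
                rw [List.drop_eq_nil_of_le (by omega)] at hz
                exact absurd hz (List.not_mem_nil)
              have := desc_all_le_front hjm2 hpm' z hz
              rw [PySem.List.pyGetD_natCast, List.getD_eq_getElem merged 0 hjm2, hgi] at hc
              omega
          have hR : ∀ z ∈ s.drop (i + 1) ++ merged.drop (j + 1), z ≤ s[i]'hi1 := by
            intro z hz
            rcases List.mem_append.mp hz with hz | hz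
            · exact desc_mem_le hps z hz
            · exact hmt1_le_x z hz
          have hperm2 : l.Perm (merged[j] :: s[i]'hi1 :: (s.drop (i + 1) ++ merged.drop (j + 1))) := by
            refine hperm.trans ?_
            simp only [List.cons_append]
            exact (List.Perm.cons _ List.perm_middle).trans (List.Perm.swap _ _ _)
          rw [aLoop_step l _ (s[i]'hi1) merged[j] hR (le_of_lt hlt) hperm2, hgi, hgj]
          set v := s[i]'hi1 + 2 * merged[j] with hv
          have hvlt : v < s[i]'hi1 := by rw [hv]; omega
          have hvneg : v < 0 := by rw [hv]; omega
          have hv3 : 3 * s[i]'hi1 ≤ v := by rw [hv]; omega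
          have hvB : v ≤ 3 * B := by rw [hv]; omega
          have hdm : (merged ++ [v]).drop (j + 1) = merged.drop (j + 1) ++ [v] := List.drop_append_of_le_length (by omega)
          apply IH (n - 1) (by omega) s (i + 1) (merged ++ [v]) (j + 1) _ (s[i]'hi1)
          · rw [hdm]; simp only [List.length_drop, List.length_append, List.length_cons, List.length_nil]; omega
          · omega
          · simp only [List.length_append, List.length_cons, List.length_nil]; omega
          · exact (List.pairwise_cons.mp hps).2
          · rw [hdm]
            refine desc_append_singleton hpm' ?_
            intro z hz; have := h3 z (List.mem_cons_of_mem _ hz); omega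
          · exact fun z hz => desc_mem_le hps z hz
          · rw [hdm]
            intro z hz
            rcases List.mem_append.mp hz with hz | hz
            · exact hmt1_le_x z hz
            · rcases (by simpa using hz : z = v) with rfl; exact le_of_lt hvlt
          · exact fun z hz => hns z (List.mem_cons_of_mem _ hz)
          · rw [hdm]
            intro z hz
            rcases List.mem_append.mp hz with hz | hz
            · exact hnm z (List.mem_cons_of_mem _ hz)
            · rcases (by simpa using hz : z = v) with rfl; exact hvneg
          · rw [hdm]
            intro z hz
            rcases List.mem_append.mp hz with hz | hz
            · have := h3 z (List.mem_cons_of_mem _ hz); omega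
            · rcases (by simpa using hz : z = v) with rfl; exact hv3
          · omega
          · rw [hdm, ← List.append_assoc]
            exact List.Perm.append_right [v] (PySem.List.sorted_perm _ (fun w => w) false)
        · -- both pops from merged
          rw [dif_neg c2]
          have hj1 : j + 1 < merged.length := by
            rcases Nat.lt_or_ge i s.length with hi1 | hi1
            · by_contra hcon
              exact c2 ⟨hi1, Or.inl (by omega)⟩
            · omega
          have hjm : j < merged.length := by omega
          have hgj : PySem.List.pyGetD merged (j : Int) 0 = merged[j] := by
            rw [PySem.List.pyGetD_natCast]; exact List.getD_eq_getElem merged 0 hjm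
          have hgj1 : PySem.List.pyGetD merged ((j + 1 : Nat) : Int) 0 = merged[j + 1] := by
            rw [PySem.List.pyGetD_natCast]; exact List.getD_eq_getElem merged 0 hj1
          have hstj : merged.drop j = merged[j] :: merged.drop (j + 1) := List.drop_eq_getElem_cons hjm
          have hstj2 : merged.drop (j + 1) = merged[j + 1] :: merged.drop (j + 2) := List.drop_eq_getElem_cons hj1
          rw [hstj, hstj2] at hpm hbm hnm h3 hperm
          have hmj_lt : merged[j] < 0 := hnm _ List.mem_cons_self
          have hmjB : merged[j] ≤ B := hbm _ List.mem_cons_self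
          have hmj1_lt : merged[j + 1] < 0 := hnm _ (List.mem_cons_of_mem _ List.mem_cons_self)
          have hmj1B : merged[j + 1] ≤ B := hbm _ (List.mem_cons_of_mem _ List.mem_cons_self)
          have hxy : merged[j + 1] ≤ merged[j] := desc_mem_le hpm _ List.mem_cons_self
          have hst_le_x : ∀ z ∈ s.drop i, z ≤ merged[j + 1] := by
            intro z hz
            have hi1 : i < s.length := by
              by_contra hcon
              rw [List.drop_eq_nil_of_le (by omega)] at hz
              exact absurd hz (List.not_mem_nil)
            have hcontra : ¬ (merged.length ≤ j + 1 ∨ PySem.List.pyGetD merged ((j + 1 : Nat) : Int) 0 ≤ PySem.List.pyGetD s (i : Int) 0) := fun hor => c2 ⟨hi1, hor⟩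
            push Not at hcontra
            obtain ⟨-, hlt⟩ := hcontra
            rw [hgj1, PySem.List.pyGetD_natCast, List.getD_eq_getElem s 0 hi1] at hlt
            have := desc_all_le_front hi1 hps z hz
            omega
          have hpm'' := (List.pairwise_cons.mp (List.pairwise_cons.mp hpm).2).2
          have hR : ∀ z ∈ s.drop i ++ merged.drop (j + 2), z ≤ merged[j + 1] := by
            intro z hz
            rcases List.mem_append.mp hz with hz | hz
            · exact hst_le_x z hz
            · exact desc_mem_le (List.pairwise_cons.mp hpm).2 z hz
          have hperm2 : l.Perm (merged[j] :: merged[j + 1] :: (s.drop i ++ merged.drop (j + 2))) := by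
            refine hperm.trans ?_
            refine List.Perm.trans List.perm_middle ?_
            exact List.Perm.cons _ List.perm_middle
          rw [aLoop_step l _ merged[j + 1] merged[j] hR hxy hperm2, hgj, hgj1]
          set v := merged[j + 1] + 2 * merged[j] with hv
          have hvlt : v < merged[j + 1] := by rw [hv]; omega
          have hvneg : v < 0 := by rw [hv]; omega
          have hv3 : 3 * merged[j + 1] ≤ v := by rw [hv]; omega
          have hvB : v ≤ 3 * B := by rw [hv]; omega
          have hdm : (merged ++ [v]).drop (j + 2) = merged.drop (j + 2) ++ [v] := List.drop_append_of_le_length (by omega)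
          apply IH (n - 1) (by omega) s i (merged ++ [v]) (j + 2) _ merged[j + 1]
          · rw [hdm]; simp only [List.length_drop, List.length_append, List.length_cons, List.length_nil]; omega
          · omega
          · simp only [List.length_append, List.length_cons, List.length_nil]; omega
          · exact hps
          · rw [hdm]
            refine desc_append_singleton hpm'' ?_
            intro z hz
            have := h3 z (List.mem_cons_of_mem _ (List.mem_cons_of_mem _ hz)); omega
          · exact hst_le_x
          · rw [hdm]
            intro z hz
            rcases List.mem_append.mp hz with hz | hz
            · exact desc_mem_le (List.pairwise_cons.mp hpm).2 z hz
            · rcases (by simpa using hz : z = v) with rfl; exact le_of_lt hvlt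
          · exact hns
          · rw [hdm]
            intro z hz
            rcases List.mem_append.mp hz with hz | hz
            · exact hnm z (List.mem_cons_of_mem _ (List.mem_cons_of_mem _ hz))
            · rcases (by simpa using hz : z = v) with rfl; exact hvneg
          · rw [hdm]
            intro z hz
            rcases List.mem_append.mp hz with hz | hz
            · have := h3 z (List.mem_cons_of_mem _ (List.mem_cons_of_mem _ hz)); omega
            · rcases (by simpa using hz : z = v) with rfl; exact hv3
          · omega
          · rw [hdm, ← List.append_assoc]
            exact List.Perm.append_right [v] (PySem.List.sorted_perm _ (fun w => w) false)
    · -- the loop is over: exactly one orb remains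
      rw [dif_neg hg]
      have hone : (s.length - i) + (merged.length - j) = 1 := by omega
      by_cases hi1 : i < s.length
      · rw [if_pos hi1]
        have hsi : s.drop i = [s[i]] := by
          rw [List.drop_eq_getElem_cons hi1, List.drop_eq_nil_of_le (by omega)]
        have hmj : merged.drop j = [] := List.drop_eq_nil_of_le (by omega)
        rw [hsi, hmj] at hperm
        have hl : l = [s[i]] := List.perm_singleton.mp (by simpa using hperm)
        have hstop : aLoop l = l := by
          rw [aLoop, dif_neg (by rw [hl]; simp)]
        rw [hstop, hl, PySem.List.pyGetD_natCast, List.getD_eq_getElem s 0 hi1]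
        simp [PySem.List.pyGetD_zero_cons]
      · rw [if_neg hi1]
        have hjm : j < merged.length := by omega
        have hsi : s.drop i = [] := List.drop_eq_nil_of_le (by omega)
        have hmj : merged.drop j = [merged[j]] := by
          rw [List.drop_eq_getElem_cons hjm, List.drop_eq_nil_of_le (by omega)]
        rw [hsi, hmj] at hperm
        have hl : l = [merged[j]] := List.perm_singleton.mp (by simpa using hperm)
        have hstop : aLoop l = l := by
          rw [aLoop, dif_neg (by rw [hl]; simp)]
        rw [hstop, hl, PySem.List.pyGetD_natCast, List.getD_eq_getElem merged 0 hjm]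
        simp [PySem.List.pyGetD_zero_cons]

lemma phase1_eq : ∀ (n : Nat) (s : List Int) (acc : Int) (i : Nat) (l : List Int),
    s.length - i = n → i ≤ s.length →
    (s.drop i).Pairwise (fun u v => v ≤ u) →
    (∀ z ∈ s.drop i, z ≤ acc) →
    l.Perm (acc :: s.drop i) →
    PySem.Int.mod (PySem.List.pyGetD (aLoop l) 0 0) (10 ^ 9 + 7) = bPhase1 s acc i := by
  intro n
  induction n using Nat.strong_induction_on with
  | _ n IH =>
    intro s acc i l hn hi hpair hall hperm
    rw [bPhase1]
    by_cases h : i < s.length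
    · rw [dif_pos h]
      have hst : s.drop i = s[i] :: s.drop (i + 1) := List.drop_eq_getElem_cons h
      have hgi : PySem.List.pyGetD s (i : Int) 0 = s[i] := by
        rw [PySem.List.pyGetD_natCast]
        exact List.getD_eq_getElem s 0 h
      by_cases ha : 0 ≤ acc
      · rw [if_pos ha]
        have hpair' : (s[i] :: s.drop (i + 1)).Pairwise (fun u v : Int => v ≤ u) := hst ▸ hpair
        have hx : ∀ z ∈ s.drop (i + 1), z ≤ s[i] := desc_mem_le hpair'
        have hxy : s[i] ≤ acc := hall s[i] (by rw [hst]; exact List.mem_cons_self)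
        have hperm' : l.Perm (acc :: s[i] :: s.drop (i + 1)) := by rw [← hst]; exact hperm
        rw [aLoop_step l (s.drop (i + 1)) s[i] acc hx hxy hperm', hgi]
        apply IH (n - 1) (by omega) s (s[i] + 2 * acc) (i + 1) _ (by omega) (by omega)
          (List.pairwise_cons.mp hpair').2
          (fun z hz => le_trans (hx z hz) (by linarith))
        exact (List.perm_append_singleton _ _).trans
          ((PySem.List.sorted_perm (s.drop (i + 1)) (fun v => v) false).cons _)
      · rw [if_neg ha]
        have hneg : acc < 0 := by omega
        apply phase2_eq ((s.drop i).length + 1) s i [acc] 0 l acc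
        · simp
        · omega
        · simp
        · exact hpair
        · simp
        · exact hall
        · intro z hz; simp at hz; omega
        · intro z hz; exact lt_of_le_of_lt (hall z hz) hneg
        · intro z hz; simp at hz; omega
        · intro z hz; simp at hz; omega
        · omega
        · exact hperm.trans (List.perm_append_singleton acc _).symm
    · rw [dif_neg h]
      have hd : s.drop i = [] := List.drop_eq_nil_of_le (by omega)
      rw [hd] at hperm
      have hl : l = [acc] := List.perm_singleton.mp hperm
      have hstop : aLoop l = l := by
        rw [aLoop, dif_neg (by rw [hl]; simp)]
      rw [hstop, hl]
      simp [PySem.List.pyGetD_zero_cons]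

-- ===== VERDICT (by name: the statement is the Claim_ definition above) =====
theorem max_magical_power_spec : Claim_equal_max_magical_power := by
  intro orbs hdom hpre
  show max_magical_power orbs = max_magical_power_alt orbs
  have hsp : (PySem.List.sorted orbs (fun v => v) true).Perm orbs := PySem.List.sorted_perm orbs _ true
  have hlen : (PySem.List.sorted orbs (fun v => v) true).length = orbs.length :=
    PySem.List.length_sorted orbs _ true
  have hne : 0 < orbs.length := List.length_pos_iff.mpr hpre
  have hpair : (PySem.List.sorted orbs (fun v => v) true).Pairwise (fun u v : Int => v ≤ u) :=
    PySem.List.sorted_pairwise_rev orbs (fun v => v)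
  set s := PySem.List.sorted orbs (fun v => v) true with hs
  have h0 : s = s[0]'(by omega) :: s.drop 1 := by
    conv_lhs => rw [← List.drop_zero (l := s)]
    rw [List.drop_eq_getElem_cons (by omega)]
  have hacc : PySem.List.pyGetD s 0 0 = s[0]'(by omega) := by
    rw [PySem.List.pyGetD_zero]
    exact List.getD_eq_getElem s 0 (by omega)
  have hdrop1 : List.Pairwise (fun u v : Int => v ≤ u) (s.drop 1) :=
    hpair.sublist (List.drop_sublist 1 s)
  have hall : ∀ z ∈ s.drop 1, z ≤ PySem.List.pyGetD s 0 0 := by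
    rw [hacc]
    exact desc_mem_le (h0 ▸ hpair)
  have hperm' : orbs.Perm (PySem.List.pyGetD s 0 0 :: s.drop 1) := by
    rw [hacc, ← h0]
    exact hsp.symm
  have hmain := phase1_eq (s.length - 1) s (PySem.List.pyGetD s 0 0) 1 orbs rfl (by omega)
    hdrop1 hall hperm'
  simpa [max_magical_power, max_magical_power_alt, MOD] using hmain
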